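-- pv_equiv track=rewrite | github.com/koguz/Tartarus | analyze_behaviors.py | decompose_pattern
-- ===== SOURCE A (Python) =====
-- def get_state_action(state_id, state_stats):
--     """Get the dominant action for a state."""
--     stats = state_stats.get(str(state_id), {})
--     action_counts = stats.get('action_counts', {})
--     if not action_counts:
--         return '?'
--
--     push = action_counts.get('push', 0)
--     forward = action_counts.get('forward', 0)
--     turn_left = action_counts.get('turn_left', 0)
--     turn_right = action_counts.get('turn_right', 0)
--     turn = turn_left + turn_right
--
--     if push >= forward and push >= turn:
--         return 'P'
--     elif forward >= turn:
--         return 'F'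
--     else:
--         if turn_left > turn_right:
--             return 'L'
--         else:
--             return 'R'
--
-- def pattern_to_actions(pattern, state_stats):
--     """Convert a state pattern to action string."""
--     return ''.join(get_state_action(s, state_stats) for s in pattern)
--
-- def decompose_pattern(pattern, atomic_patterns, state_stats):
--     """Try to decompose a pattern into atomic sub-patterns."""
--     actions = pattern_to_actions(pattern, state_stats)
--     decomposition = []
--
--     # Sort atomic patterns by length (longest first) for greedy matching
--     sorted_atoms = sorted(atomic_patterns, key=len, reverse=True)
--
--     i = 0
--     while i < len(pattern):
--         matched = False
--         for atom in sorted_atoms: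
--             atom_len = len(atom)
--             if i + atom_len <= len(pattern):
--                 if tuple(pattern[i:i+atom_len]) == atom:
--                     decomposition.append(atom)
--                     i += atom_len
--                     matched = True
--                     break
--         if not matched:
--             # Single state as fallback
--             decomposition.append((pattern[i],))
--             i += 1
--
--     return decomposition
-- ===== SOURCE B (Python) =====
-- def decompose_pattern(pattern, atomic_patterns, state_stats):
--     """Greedy longest-match decomposition using a hash set of atoms: at each
--     position try the longest feasible length first with an O(1) membership
--     test, instead of scanning the whole (sorted) atom list."""
--     atoms = set(atomic_patterns)
--     maxlen = 0
--     for a in atomic_patterns: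
--         if len(a) > maxlen:
--             maxlen = len(a)
--     decomposition = []
--     n = len(pattern)
--     i = 0
--     while i < n:
--         step = 0
--         for L in range(min(maxlen, n - i), 1, -1):
--             if tuple(pattern[i:i+L]) in atoms:
--                 decomposition.append(tuple(pattern[i:i+L]))
--                 step = L
--                 break
--         if step == 0:
--             # single state (also covers a length-1 atom: same tuple either way)
--             decomposition.append((pattern[i],))
--             step = 1
--         i += step
--     return decomposition
-- ===== Notes on version B (the rewrite author's own statement) =====
-- stated objective: faster
-- what changed: Instead of re-scanning the length-sorted atom list at every position, B builds a hash set of atoms once and probes it from the longest feasible length downwards (longest match is unique per length), replacing the inner scan over all atoms by at most maxlen O(1) set lookups; the unused 'actions' computation is dropped.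
import Mathlib
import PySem

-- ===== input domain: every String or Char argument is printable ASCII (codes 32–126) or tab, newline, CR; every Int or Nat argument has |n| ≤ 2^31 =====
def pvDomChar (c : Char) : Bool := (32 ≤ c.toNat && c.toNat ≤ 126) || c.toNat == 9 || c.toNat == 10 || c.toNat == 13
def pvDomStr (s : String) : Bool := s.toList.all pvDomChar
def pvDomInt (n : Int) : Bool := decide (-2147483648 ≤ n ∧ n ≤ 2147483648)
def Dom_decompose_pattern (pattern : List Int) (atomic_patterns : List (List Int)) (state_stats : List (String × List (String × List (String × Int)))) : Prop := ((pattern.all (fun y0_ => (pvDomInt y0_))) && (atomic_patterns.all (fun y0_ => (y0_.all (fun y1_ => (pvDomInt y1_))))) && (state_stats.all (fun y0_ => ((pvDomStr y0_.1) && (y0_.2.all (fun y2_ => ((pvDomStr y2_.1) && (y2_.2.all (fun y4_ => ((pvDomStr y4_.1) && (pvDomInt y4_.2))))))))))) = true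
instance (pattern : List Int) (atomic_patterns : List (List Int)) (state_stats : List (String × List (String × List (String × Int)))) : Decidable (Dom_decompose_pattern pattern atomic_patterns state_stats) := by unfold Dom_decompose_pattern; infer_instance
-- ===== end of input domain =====

-- B replaces A's scan of the length-sorted atom list at every position by a hash-set of
-- atoms probed from the longest feasible length downwards (objective: faster lookups).


-- ===== PORT A =====
-- helper get_state_action: dominant-action letter (feeds only the unused 'actions')
def get_state_action (state_id : Int) (state_stats : List (String × List (String × List (String × Int)))) : String :=
  let stats := PySem.Dict.getD (PySem.Dict.mk state_stats) (PySem.Int.toStr state_id) []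
  let action_counts := PySem.Dict.getD (PySem.Dict.mk stats) "action_counts" []
  if action_counts = [] then "?"
  else
    let push := PySem.Dict.getD (PySem.Dict.mk action_counts) "push" 0
    let forward := PySem.Dict.getD (PySem.Dict.mk action_counts) "forward" 0
    let turn_left := PySem.Dict.getD (PySem.Dict.mk action_counts) "turn_left" 0
    let turn_right := PySem.Dict.getD (PySem.Dict.mk action_counts) "turn_right" 0
    let turn := turn_left + turn_right
    if push ≥ forward ∧ push ≥ turn then "P"
    else if forward ≥ turn then "F"
    else if turn_left > turn_right then "L"
    else "R"

def pattern_to_actions (pattern : List Int) (state_stats : List (String × List (String × List (String × Int)))) : String :=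
  PySem.Str.join "" (pattern.map (fun s => get_state_action s state_stats))

-- A's inner for-loop body: 'if i + atom_len <= len(pattern): if tuple(pattern[i:i+atom_len]) == atom'
def pvMatchA (pattern : List Int) (n i : Nat) (atom : List Int) : Bool :=
  decide (i + atom.length ≤ n) &&
    (PySem.List.slice pattern (some (i : Int)) (some ((i : Int) + (atom.length : Int))) == atom)

-- A's while-loop; fuel is a totality device only: it is exhausted exactly when an empty
-- atom keeps i fixed, where the Python loops forever (excluded by Pre_ below)
def pvLoopA (pattern : List Int) (sorted_atoms : List (List Int)) (n : Nat) :
    Nat → Nat → List (List Int) → List (List Int)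
  | 0, _, acc => acc
  | fuel+1, i, acc =>
    if i < n then
      match sorted_atoms.find? (pvMatchA pattern n i) with
      | some atom => pvLoopA pattern sorted_atoms n fuel (i + atom.length) (acc ++ [atom])
      | none => pvLoopA pattern sorted_atoms n fuel (i + 1) (acc ++ [[PySem.List.pyGetD pattern (i : Int) 0]])
    else acc

def decompose_pattern (pattern : List Int) (atomic_patterns : List (List Int)) (state_stats : List (String × List (String × List (String × Int)))) : List (List Int) :=
  let _actions := pattern_to_actions pattern state_stats
  let sorted_atoms := PySem.List.sorted atomic_patterns (fun a => a.length) true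
  pvLoopA pattern sorted_atoms pattern.length pattern.length 0 []

-- ===== PORT B =====
-- B's inner for-loop 'for L in range(min(maxlen, n-i), 1, -1)': first (largest) L ≥ 2 whose
-- slice is in the atom set.  (pattern.drop i).take L = pattern[i:i+L] for natural i, L
-- (PySem.List.slice_natCast_add).
def pvFindL (pattern : List Int) (atoms : List (List Int)) (i : Nat) : Nat → Option Nat
  | 0 => none
  | 1 => none
  | (L+2) =>
    if PySem.Set.contains atoms ((pattern.drop i).take (L+2)) then some (L+2)
    else pvFindL pattern atoms i (L+1)

-- B's while-loop; B always advances i by ≥ 1, so fuel = n - i suffices (totality device only)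
def pvAltLoop (pattern : List Int) (atoms : List (List Int)) (maxlen n : Nat) :
    Nat → Nat → List (List Int)
  | 0, _ => []
  | fuel+1, i =>
    if i < n then
      match pvFindL pattern atoms i (min maxlen (n - i)) with
      | some L => (pattern.drop i).take L :: pvAltLoop pattern atoms maxlen n fuel (i + L)
      | none => [PySem.List.pyGetD pattern (i : Int) 0] :: pvAltLoop pattern atoms maxlen n fuel (i + 1)
    else []

def decompose_pattern_alt (pattern : List Int) (atomic_patterns : List (List Int)) (state_stats : List (String × List (String × List (String × Int)))) : List (List Int) :=
  let atoms := PySem.Set.ofList atomic_patterns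
  let maxlen := atomic_patterns.foldl (fun m a => if a.length > m then a.length else m) 0
  pvAltLoop pattern atoms maxlen pattern.length pattern.length 0

-- ===== PRECONDITION & SPEC =====
-- Pre_ excludes only inputs on which A never RETURNS: with the empty atom () among
-- atomic_patterns and a nonempty pattern, the empty atom always matches and advances i
-- by 0, so A's while-loop runs forever.
def Pre_decompose_pattern (pattern : List Int) (atomic_patterns : List (List Int)) (state_stats : List (String × List (String × List (String × Int)))) : Prop :=
  pattern = [] ∨ [] ∉ atomic_patterns
instance (pattern : List Int) (atomic_patterns : List (List Int)) (state_stats : List (String × List (String × List (String × Int)))) : Decidable (Pre_decompose_pattern pattern atomic_patterns state_stats) := by unfold Pre_decompose_pattern; infer_instance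

def pvWitness_decompose_pattern : List Int × List (List Int) × (List (String × List (String × List (String × Int)))) :=
  ([1, 2, 1, 3], [[1, 2], [3]], [])

def Spec_decompose_pattern (pattern : List Int) (atomic_patterns : List (List Int)) (state_stats : List (String × List (String × List (String × Int)))) (out : List (List Int)) : Prop := out = decompose_pattern_alt pattern atomic_patterns state_stats
instance (pattern : List Int) (atomic_patterns : List (List Int)) (state_stats : List (String × List (String × List (String × Int)))) (out : List (List Int)) : Decidable (Spec_decompose_pattern pattern atomic_patterns state_stats out) := by unfold Spec_decompose_pattern; infer_instance

-- ===== CLAIM (what is proved, stated in full; the proofs are below) =====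
def Claim_equal_decompose_pattern : Prop := ∀ (pattern : List Int) (atomic_patterns : List (List Int)) (state_stats : List (String × List (String × List (String × Int)))), Dom_decompose_pattern pattern atomic_patterns state_stats → Pre_decompose_pattern pattern atomic_patterns state_stats → Spec_decompose_pattern pattern atomic_patterns state_stats (decompose_pattern pattern atomic_patterns state_stats)

-- ===== LEMMAS AND PROOFS =====

-- 'atom matches at position i' (what A's inner test decides)
def pvMatches (pattern : List Int) (i : Nat) (atom : List Int) : Prop :=
  i + atom.length ≤ pattern.length ∧ (pattern.drop i).take atom.length = atom

lemma pvMatchA_iff (pattern : List Int) (i : Nat) (atom : List Int) :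
    pvMatchA pattern pattern.length i atom = true ↔ pvMatches pattern i atom := by
  unfold pvMatchA pvMatches
  rw [PySem.List.slice_natCast_add]
  simp

lemma pvFoldMax_base_le (l : List (List Int)) :
    ∀ m : Nat, m ≤ l.foldl (fun m a => if a.length > m then a.length else m) m := by
  induction l with
  | nil => intro m; simp
  | cons x xs ih =>
    intro m
    simp only [List.foldl_cons]
    refine le_trans ?_ (ih _)
    split <;> omega

lemma pvFoldMax_mem (l : List (List Int)) (a : List Int) (ha : a ∈ l) :
    ∀ m : Nat, a.length ≤ l.foldl (fun m a => if a.length > m then a.length else m) m := by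
  induction l with
  | nil => cases ha
  | cons x xs ih =>
    intro m
    simp only [List.foldl_cons]
    rcases List.mem_cons.1 ha with h | h
    · subst h
      refine le_trans ?_ (pvFoldMax_base_le xs _)
      split <;> omega
    · exact ih h _

lemma pvFindA_spec (pattern : List Int) (i : Nat) :
    ∀ (S : List (List Int)), S.Pairwise (fun a b => b.length ≤ a.length) →
      ((∀ a, S.find? (pvMatchA pattern pattern.length i) = some a →
          a ∈ S ∧ pvMatches pattern i a ∧ ∀ b ∈ S, pvMatches pattern i b → b.length ≤ a.length) ∧
       (S.find? (pvMatchA pattern pattern.length i) = none → ∀ b ∈ S, ¬ pvMatches pattern i b)) := by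
  intro S hpw
  induction S with
  | nil => exact ⟨fun a h => by simp at h, fun _ b hb => by cases hb⟩
  | cons x xs ih =>
    have hpw' := (List.pairwise_cons.1 hpw).2
    have hx := (List.pairwise_cons.1 hpw).1
    by_cases hpx : pvMatchA pattern pattern.length i x = true
    · constructor
      · intro a ha
        rw [List.find?_cons_of_pos hpx] at ha
        cases ha
        refine ⟨List.mem_cons_self, (pvMatchA_iff _ _ _).1 hpx, ?_⟩
        intro b hb _
        rcases List.mem_cons.1 hb with h | h
        · subst h; exact le_refl _
        · exact hx b h
      · intro hnone
        rw [List.find?_cons_of_pos hpx] at hnone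
        cases hnone
    · have hneg : pvMatchA pattern pattern.length i x ≠ true := hpx
      constructor
      · intro a ha
        rw [List.find?_cons_of_neg hneg] at ha
        obtain ⟨hmem, hm, hmax⟩ := (ih hpw').1 a ha
        refine ⟨List.mem_cons_of_mem _ hmem, hm, ?_⟩
        intro b hb hmb
        rcases List.mem_cons.1 hb with h | h
        · subst h; exact absurd ((pvMatchA_iff _ _ _).2 hmb) hpx
        · exact hmax b h hmb
      · intro hnone
        rw [List.find?_cons_of_neg hneg] at hnone
        intro b hb hmb
        rcases List.mem_cons.1 hb with h | h
        · subst h; exact hpx ((pvMatchA_iff _ _ _).2 hmb)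
        · exact (ih hpw').2 hnone b h hmb

lemma pvFindL_some (pattern : List Int) (atoms : List (List Int)) (i : Nat) :
    ∀ (L0 L : Nat), pvFindL pattern atoms i L0 = some L →
      2 ≤ L ∧ L ≤ L0 ∧ (pattern.drop i).take L ∈ atoms ∧
        ∀ L', L < L' → L' ≤ L0 → (pattern.drop i).take L' ∉ atoms := by
  intro L0
  induction L0 with
  | zero => intro L h; simp [pvFindL] at h
  | succ K ih =>
    intro L h
    match K, h with
    | 0, h => simp [pvFindL] at h
    | (M+1), h =>
      rw [pvFindL] at h
      split at h
      · rename_i hc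
        cases h
        refine ⟨by omega, le_refl _, (PySem.Set.contains_iff _ _).1 hc, ?_⟩
        intro L' h1 h2; omega
      · rename_i hc
        obtain ⟨h2, h3, h4, h5⟩ := ih L h
        refine ⟨h2, by omega, h4, ?_⟩
        intro L' h1 hle
        rcases Nat.lt_or_ge L' (M+2) with hlt | hge
        · exact h5 L' h1 (by omega)
        · have : L' = M + 2 := by omega
          subst this
          intro hmem
          exact hc ((PySem.Set.contains_iff _ _).2 hmem)

lemma pvFindL_none (pattern : List Int) (atoms : List (List Int)) (i : Nat) :
    ∀ (L0 : Nat), pvFindL pattern atoms i L0 = none →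
      ∀ L, 2 ≤ L → L ≤ L0 → (pattern.drop i).take L ∉ atoms := by
  intro L0
  induction L0 with
  | zero => intro _ L h1 h2 _; omega
  | succ K ih =>
    intro h L h1 h2
    match K, h with
    | 0, h => intro _; omega
    | (M+1), h =>
      rw [pvFindL] at h
      split at h
      · cases h
      · rename_i hc
        rcases Nat.lt_or_ge L (M+2) with hlt | hge
        · exact ih h L h1 (by omega)
        · have : L = M + 2 := by omega
          subst this
          intro hmem
          exact hc ((PySem.Set.contains_iff _ _).2 hmem)

-- a slice found in the atom set really is a matching atom
lemma pvSlice_matches (pattern : List Int) (i L : Nat) (hi : i < pattern.length)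
    (hL : L ≤ pattern.length - i) :
    ((pattern.drop i).take L).length = L ∧ pvMatches pattern i ((pattern.drop i).take L) := by
  have hlen : ((pattern.drop i).take L).length = L := by
    simp [List.length_take, List.length_drop]; omega
  refine ⟨hlen, ?_, ?_⟩
  · rw [hlen]; omega
  · rw [hlen]

-- the per-position correspondence between A's sorted scan and B's longest-first probe
lemma pvStep (pattern : List Int) (atomic_patterns : List (List Int))
    (hne : [] ∉ atomic_patterns) (i : Nat) (hi : i < pattern.length) :
    (List.find? (pvMatchA pattern pattern.length i) (PySem.List.sorted atomic_patterns (fun a => a.length) true) = none ∧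
      pvFindL pattern (PySem.Set.ofList atomic_patterns) i
        (min (atomic_patterns.foldl (fun m a => if a.length > m then a.length else m) 0) (pattern.length - i)) = none)
    ∨ (∃ a, List.find? (pvMatchA pattern pattern.length i) (PySem.List.sorted atomic_patterns (fun a => a.length) true) = some a ∧
        ((1 ≤ a.length ∧
          pvFindL pattern (PySem.Set.ofList atomic_patterns) i
            (min (atomic_patterns.foldl (fun m a => if a.length > m then a.length else m) 0) (pattern.length - i)) = some a.length ∧
          (pattern.drop i).take a.length = a)
        ∨ (a.length = 1 ∧
            pvFindL pattern (PySem.Set.ofList atomic_patterns) i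
              (min (atomic_patterns.foldl (fun m a => if a.length > m then a.length else m) 0) (pattern.length - i)) = none ∧
            a = [PySem.List.pyGetD pattern (i : Int) 0]))) := by
  set n := pattern.length with hn
  set ml := atomic_patterns.foldl (fun m a => if a.length > m then a.length else m) 0 with hml
  set S := PySem.List.sorted atomic_patterns (fun a => a.length) true with hS
  set st := PySem.Set.ofList atomic_patterns with hst
  have hpw : S.Pairwise (fun a b => b.length ≤ a.length) :=
    PySem.List.sorted_pairwise_rev (xs := atomic_patterns) (key := fun a => a.length)
  have hmemS : ∀ x : List Int, x ∈ S ↔ x ∈ atomic_patterns := fun x =>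
    PySem.List.mem_sorted (xs := atomic_patterns) (key := fun a => a.length) (rev := true) (x := x)
  have hmemst : ∀ x : List Int, x ∈ st ↔ x ∈ atomic_patterns := fun x =>
    PySem.Set.mem_ofList (xs := atomic_patterns) (y := x)
  obtain ⟨hsome, hnone⟩ := pvFindA_spec pattern i S hpw
  cases hf : S.find? (pvMatchA pattern n i) with
  | none =>
    left
    refine ⟨rfl, ?_⟩
    cases hB : pvFindL pattern st i (min ml (n - i)) with
    | none => rfl
    | some L =>
      exfalso
      obtain ⟨h2, hle, hmem, _⟩ := pvFindL_some pattern st i _ L hB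
      have hLn : L ≤ n - i := by omega
      obtain ⟨hlen, hmatch⟩ := pvSlice_matches pattern i L hi hLn
      exact hnone hf _ ((hmemS _).2 ((hmemst _).1 hmem)) hmatch
  | some a =>
    right
    refine ⟨a, rfl, ?_⟩
    obtain ⟨hmemA, hma, hmax⟩ := hsome a hf
    have haP : a ∈ atomic_patterns := (hmemS _).1 hmemA
    have ha1 : 1 ≤ a.length := by
      rcases Nat.eq_zero_or_pos a.length with h | h
      · exact absurd ((List.length_eq_zero_iff).mp h ▸ haP) hne
      · exact h
    have hml_a : a.length ≤ ml := pvFoldMax_mem atomic_patterns a haP 0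
    have hna : i + a.length ≤ n := hma.1
    by_cases h2 : 2 ≤ a.length
    · left
      have haMin : a.length ≤ min ml (n - i) := by omega
      have hmem_a : (pattern.drop i).take a.length ∈ st := by
        rw [hma.2]; exact (hmemst _).2 haP
      cases hB : pvFindL pattern st i (min ml (n - i)) with
      | none =>
        exact absurd hmem_a (pvFindL_none pattern st i _ hB a.length h2 haMin)
      | some L =>
        obtain ⟨hL2, hLle, hLmem, hLmax⟩ := pvFindL_some pattern st i _ L hB
        have hLn : L ≤ n - i := by omega
        obtain ⟨hlen, hmatch⟩ := pvSlice_matches pattern i L hi hLn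
        have hb : (pattern.drop i).take L ∈ atomic_patterns := (hmemst _).1 hLmem
        have hLlea : L ≤ a.length := by
          have h := hmax _ ((hmemS _).2 hb) hmatch
          rwa [hlen] at h
        have heq : L = a.length := by
          rcases Nat.lt_or_ge L a.length with hlt | hge
          · exact absurd hmem_a (hLmax a.length hlt haMin)
          · omega
        subst heq
        exact ⟨ha1, rfl, hma.2⟩
    · right
      have h1 : a.length = 1 := by omega
      have hBn : pvFindL pattern st i (min ml (n - i)) = none := by
        cases hB : pvFindL pattern st i (min ml (n - i)) with
        | none => rfl
        | some L =>
          exfalso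
          obtain ⟨hL2, hLle, hLmem, _⟩ := pvFindL_some pattern st i _ L hB
          have hLn : L ≤ n - i := by omega
          obtain ⟨hlen, hmatch⟩ := pvSlice_matches pattern i L hi hLn
          have h := hmax _ ((hmemS _).2 ((hmemst _).1 hLmem)) hmatch
          rw [hlen] at h
          omega
      refine ⟨h1, hBn, ?_⟩
      have hto := hma.2
      rw [h1] at hto
      rw [List.drop_eq_getElem_cons hi] at hto
      have hgoal : a = [pattern[i]] := hto.symm.trans rfl
      rw [PySem.List.pyGetD_natCast, hgoal]
      simp [List.getD_eq_getElem?_getD, List.getElem?_eq_getElem hi]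

lemma pvLoop_eq (pattern : List Int) (atomic_patterns : List (List Int))
    (hne : [] ∉ atomic_patterns) :
    ∀ (fa fb i : Nat) (acc : List (List Int)),
      pattern.length - i ≤ fa → pattern.length - i ≤ fb →
      pvLoopA pattern (PySem.List.sorted atomic_patterns (fun a => a.length) true) pattern.length fa i acc
        = acc ++ pvAltLoop pattern (PySem.Set.ofList atomic_patterns)
            (atomic_patterns.foldl (fun m a => if a.length > m then a.length else m) 0) pattern.length fb i := by
  intro fa
  induction fa with
  | zero =>
    intro fb i acc hfa hfb
    have hi : ¬ i < pattern.length := by omega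
    cases fb with
    | zero => simp [pvLoopA, pvAltLoop]
    | succ fb => simp [pvLoopA, pvAltLoop, hi]
  | succ fa ih =>
    intro fb i acc hfa hfb
    by_cases hi : i < pattern.length
    · obtain ⟨fb', rfl⟩ : ∃ fb', fb = fb' + 1 := by
        cases fb with
        | zero => omega
        | succ fb' => exact ⟨fb', rfl⟩
      simp only [pvLoopA, pvAltLoop, if_pos hi]
      rcases pvStep pattern atomic_patterns hne i hi with ⟨hA, hB⟩ | ⟨a, hA, hcase⟩
      · rw [hA, hB]
        dsimp only
        rw [ih fb' (i + 1) _ (by omega) (by omega)]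
        simp
      · rcases hcase with ⟨ha1, hB, hslice⟩ | ⟨h1, hB, ha⟩
        · rw [hA, hB]
          dsimp only
          rw [hslice, ih fb' (i + a.length) _ (by omega) (by omega)]
          simp
        · rw [hA, hB]
          dsimp only
          rw [h1, ha, ih fb' (i + 1) _ (by omega) (by omega)]
          simp
    · cases fb with
      | zero => simp [pvLoopA, pvAltLoop, hi]
      | succ fb' => simp [pvLoopA, pvAltLoop, hi]

-- ===== VERDICT (by name: the statement is the Claim_ definition above) =====
theorem decompose_pattern_spec : Claim_equal_decompose_pattern := by
  intro pattern atomic_patterns state_stats _hdom hpre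
  unfold Spec_decompose_pattern
  rcases hpre with hp | hne
  · subst hp
    simp [decompose_pattern, decompose_pattern_alt, pvLoopA, pvAltLoop]
  · have h := pvLoop_eq pattern atomic_patterns hne pattern.length pattern.length 0 []
      (by omega) (by omega)
    simpa [decompose_pattern, decompose_pattern_alt] using h
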